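-- pv_equiv track=rewrite | github.com/miliar/Code_Jam_Webscraper | solutions_python/Problem_155/2891.py | stand_up
-- ===== SOURCE A (Python) =====
-- def stand_up(cases, max_shy, people):
--     """
--     this method finds out how many friedns need to be invited
--     and return this number
--     """
--     #nr_and_shylevel er ein string der første digit tal folk med shynesslevel 0, andre er shynesslevel 1, osb
--     #må for kvart tal kunna sjekka om det er nok folk som har reist seg for at dei siste skal greia å reisa seg
--     #maa ha folk på plass 1 for å faa alt i gong. etter det er det tal folk som har reist seg som tel
--
--     standing = 0
--     needed = 0
--
--     #dersom det er folk med nivå ein, og det alt står nokon, reiser desse seg og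
--     for i in range(len(people)):
--         #dersom nok folk alt står (inkludert needed), reiser resten seg
--         if i > standing+needed:
--             needed = i-standing
--         standing += int(people[i])
--     return standing, needed
-- ===== SOURCE B (Python) =====
-- def stand_up(cases, max_shy, people):
--     """Two-pass version: build prefix sums, then take the largest deficit."""
--     digits = [int(c) for c in people]
--     prefix = []
--     s = 0
--     for d in digits:
--         prefix.append(s)
--         s += d
--     return s, max([0] + [i - p for i, p in enumerate(prefix)])
-- ===== Notes on version B (the rewrite author's own statement) =====
-- stated objective: alternative
-- what changed: A interleaves one loop with a running `needed` accumulator updated by a conditional; B separates the work into a prefix-sum pass and a max-of-deficits reduction (needed = max(0, max_i(i - prefix_i))), returning the total from the prefix pass.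
import Mathlib
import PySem

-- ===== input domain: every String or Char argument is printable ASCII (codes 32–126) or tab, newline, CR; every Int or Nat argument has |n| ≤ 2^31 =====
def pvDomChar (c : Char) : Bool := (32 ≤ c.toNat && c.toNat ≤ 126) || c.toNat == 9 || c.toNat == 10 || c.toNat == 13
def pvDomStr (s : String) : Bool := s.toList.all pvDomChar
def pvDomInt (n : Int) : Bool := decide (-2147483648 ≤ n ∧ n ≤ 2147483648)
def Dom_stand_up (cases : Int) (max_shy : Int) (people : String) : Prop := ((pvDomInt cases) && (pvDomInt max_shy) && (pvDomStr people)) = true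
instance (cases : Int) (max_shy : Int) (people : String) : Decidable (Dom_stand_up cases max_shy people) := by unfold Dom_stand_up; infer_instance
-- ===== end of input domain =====

-- B replaces A's single loop with a running conditional accumulator by a prefix-sum pass
-- plus a max-of-deficits reduction (objective: alternative decomposition, same cost).

-- ===== PORT A =====
-- int(c) for a single digit character c (Pre_ restricts people to digit characters,
-- so the .getD 0 default is never reached on admitted inputs).
def pvDig (c : Char) : Int := (PySem.Int.ofStr? (String.ofList [c])).getD 0

def stand_up (cases : Int) (max_shy : Int) (people : String) : Int × Int :=
  -- standing = 0; needed = 0; for i in range(len(people)): if i > standing+needed: needed = i-standing; standing += int(people[i])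
  (PySem.List.pyRange 0 (PySem.Str.len people) 1).foldl
    (fun (st : Int × Int) i =>
      let needed := if i > st.1 + st.2 then i - st.1 else st.2
      -- people[i] with i drawn from range(len(people)) is always in range, so pyGetD is exact here
      (st.1 + pvDig (PySem.List.pyGetD people.toList i ' '), needed))
    (0, 0)

-- ===== PORT B =====
def stand_up_alt (cases : Int) (max_shy : Int) (people : String) : Int × Int :=
  -- digits = [int(c) for c in people]
  let digits := people.toList.map pvDig
  -- prefix = []; s = 0; for d in digits: prefix.append(s); s += d
  let ps := digits.foldl (fun (st : List Int × Int) d => (st.1 ++ [st.2], st.2 + d)) ([], 0)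
  -- max([0] + [i - p for i, p in enumerate(prefix)]): Python max of the nonempty list 0::deficits
  -- is the left fold of binary max seeded with its head 0 (exact for Int values)
  (ps.2, ((PySem.List.enumerate ps.1 0).map (fun p => p.1 - p.2)).foldl max 0)

-- ===== PRECONDITION & SPEC =====
-- Pre_ excludes exactly the inputs where Python A raises ValueError: int(c) on a non-digit character.
def Pre_stand_up (cases : Int) (max_shy : Int) (people : String) : Prop :=
  (people.toList.all (fun c => 48 ≤ c.toNat && c.toNat ≤ 57)) = true
instance (cases : Int) (max_shy : Int) (people : String) : Decidable (Pre_stand_up cases max_shy people) := by unfold Pre_stand_up; infer_instance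
def pvWitness_stand_up : Int × Int × String := (4, 6, "11035")

def Spec_stand_up (cases : Int) (max_shy : Int) (people : String) (out : Int × Int) : Prop := out = stand_up_alt cases max_shy people
instance (cases : Int) (max_shy : Int) (people : String) (out : Int × Int) : Decidable (Spec_stand_up cases max_shy people out) := by unfold Spec_stand_up; infer_instance

-- ===== CLAIM (what is proved, stated in full; the proofs are below) =====
def Claim_equal_stand_up : Prop := ∀ (cases : Int) (max_shy : Int) (people : String), Dom_stand_up cases max_shy people → Pre_stand_up cases max_shy people → Spec_stand_up cases max_shy people (stand_up cases max_shy people)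

-- ===== LEMMAS AND PROOFS =====

-- prefix sums starting from s, as B's fold produces them
def pvPrefixes (s : Int) : List Int → List Int
  | [] => []
  | d :: ds => s :: pvPrefixes (s + d) ds

theorem pvPrefixes_append (t : List Int) (d : Int) (s : Int) :
    pvPrefixes s (t ++ [d]) = pvPrefixes s t ++ [s + t.sum] := by
  induction t generalizing s with
  | nil => simp [pvPrefixes]
  | cons x xs ih => simp [pvPrefixes, ih, add_assoc]

theorem pvB_fold (ds : List Int) (acc : List Int) (s : Int) :
    ds.foldl (fun (st : List Int × Int) d => (st.1 ++ [st.2], st.2 + d)) (acc, s)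
      = (acc ++ pvPrefixes s ds, s + ds.sum) := by
  induction ds generalizing acc s with
  | nil => simp [pvPrefixes]
  | cons d ds ih => simp [pvPrefixes, ih, add_assoc]

theorem pvEnum_append (xs ys : List α) (s : Int) :
    PySem.List.enumerate (xs ++ ys) s
      = PySem.List.enumerate xs s ++ PySem.List.enumerate ys (s + xs.length) := by
  induction xs generalizing s with
  | nil => simp [PySem.List.enumerate_nil]
  | cons x xs ih =>
      simp [PySem.List.enumerate_cons, ih]
      ring_nf

theorem pvMaxFold_append (l : List Int) (x m : Int) :
    (l ++ [x]).foldl max m = max (l.foldl max m) x := by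
  simp [List.foldl_append]

theorem pvPrefixes_length (ds : List Int) (s : Int) :
    (pvPrefixes s ds).length = ds.length := by
  induction ds generalizing s with
  | nil => rfl
  | cons d ds ih => simp [pvPrefixes, ih]

-- the A-side loop over any character list cs computes the sum and the max deficit
theorem pvA_loop (cs : List Char) :
    (PySem.List.pyRange 0 cs.length 1).foldl
        (fun (st : Int × Int) i =>
          let needed := if i > st.1 + st.2 then i - st.1 else st.2
          (st.1 + pvDig (PySem.List.pyGetD cs i ' '), needed))
        (0, 0)
      = ((cs.map pvDig).sum,
         ((PySem.List.enumerate (pvPrefixes 0 (cs.map pvDig)) 0).map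
            (fun p => p.1 - p.2)).foldl max 0) := by
  induction cs using List.reverseRecOn with
  | nil => simp [PySem.List.pyRange_one_eq_nil, pvPrefixes, PySem.List.enumerate_nil]
  | append_singleton t c ih =>
      have hlen : ((t ++ [c]).length : Int) = (t.length : Int) + 1 := by simp
      rw [hlen, PySem.List.pyRange_one_succ_right (Int.natCast_nonneg _),
          List.foldl_append]
      have hcongr :
          (PySem.List.pyRange 0 (t.length : Int) 1).foldl
              (fun (st : Int × Int) i =>
                let needed := if i > st.1 + st.2 then i - st.1 else st.2
                (st.1 + pvDig (PySem.List.pyGetD (t ++ [c]) i ' '), needed))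
              (0, 0)
          = (PySem.List.pyRange 0 (t.length : Int) 1).foldl
              (fun (st : Int × Int) i =>
                let needed := if i > st.1 + st.2 then i - st.1 else st.2
                (st.1 + pvDig (PySem.List.pyGetD t i ' '), needed))
              (0, 0) := by
        apply PySem.List.foldl_congr_mem
        intro st i hi
        have hmem := (PySem.List.mem_pyRange_one.mp hi)
        have h0 : 0 ≤ i := hmem.1
        have h1 : i < (t.length : Int) := hmem.2
        have : PySem.List.pyGetD (t ++ [c]) i ' ' = PySem.List.pyGetD t i ' ' := by
          rw [PySem.List.pyGetD_of_nonneg (t ++ [c]) ' ' h0, PySem.List.pyGetD_of_nonneg t ' ' h0]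
          rw [List.getD_eq_getElem?_getD, List.getD_eq_getElem?_getD,
              List.getElem?_append_left (by omega)]
        rw [this]
      rw [hcongr, ih]
      have hget : PySem.List.pyGetD (t ++ [c]) (t.length : Int) ' ' = c := by
        simp [PySem.List.pyGetD_natCast]
      simp only [List.map_append, List.map_cons, List.map_nil, List.sum_append,
        List.sum_cons, List.sum_nil, add_zero, zero_add, pvPrefixes_append, pvEnum_append, PySem.List.enumerate_cons, PySem.List.enumerate_nil,
        pvMaxFold_append, pvPrefixes_length, List.length_map]
      simp only [List.foldl_cons, List.foldl_nil, hget, Prod.mk.injEq]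
      refine ⟨trivial, ?_⟩
      split_ifs with h
      · rw [max_eq_right (by omega)]
      · rw [max_eq_left (by omega)]

theorem stand_up_spec : Claim_equal_stand_up := by
  intro cases max_shy people _ _
  unfold Spec_stand_up stand_up stand_up_alt
  rw [PySem.Str.len_eq, pvA_loop]
  simp [pvB_fold]
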